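-- pv_equiv track=rewrite | github.com/kijprivate/BT | Trade/main.py | add_uniques_to_array
-- ===== SOURCE A (Python) =====
-- def add_uniques_to_array(inArray, arrayToAdd):
--     contain = False
--     toAdd = []
--     for i in range(len(arrayToAdd)):
--         for j in range(len(inArray)):
--             if(arrayToAdd[i][1] == inArray[j][1]):
--                 contain = True
--                 continue
--         if contain == False:
--             toAdd.append(arrayToAdd[i])
--         contain = False
--
--     for x in toAdd:
--         inArray.append(x)
--
--     return inArray
-- ===== SOURCE B (Python) =====
-- def add_uniques_to_array(inArray, arrayToAdd):
--     # NOTE: like A, this mutates inArray in place (extend) and returns it.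
--     # Sort the existing keys once, then locate each candidate key by a
--     # lower-bound binary search over the sorted key list.
--     keys = sorted(row[1] for row in inArray)
--     n = len(keys)
--     out = []
--     for row in arrayToAdd:
--         x = row[1]
--         lo, hi = 0, n
--         while lo < hi:
--             mid = (lo + hi) // 2
--             if keys[mid] < x:
--                 lo = mid + 1
--             else:
--                 hi = mid
--         if not (lo < n and keys[lo] == x):
--             out.append(row)
--     inArray.extend(out)
--     return inArray
-- ===== Notes on version B (the rewrite author's own statement) =====
-- stated objective: alternative
-- what changed: Replaces A's nested linear scans with a flag by sorting the existing keys once and locating each candidate key via a hand-written lower-bound binary search (O((n+m) log n) vs O(n*m)).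
-- outside the precondition, e.g. on add_uniques_to_array([[1]], []): A returns [[1]], B raises IndexError; on add_uniques_to_array([], [[5]]): A returns [[5]], B raises IndexError
import Mathlib
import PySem

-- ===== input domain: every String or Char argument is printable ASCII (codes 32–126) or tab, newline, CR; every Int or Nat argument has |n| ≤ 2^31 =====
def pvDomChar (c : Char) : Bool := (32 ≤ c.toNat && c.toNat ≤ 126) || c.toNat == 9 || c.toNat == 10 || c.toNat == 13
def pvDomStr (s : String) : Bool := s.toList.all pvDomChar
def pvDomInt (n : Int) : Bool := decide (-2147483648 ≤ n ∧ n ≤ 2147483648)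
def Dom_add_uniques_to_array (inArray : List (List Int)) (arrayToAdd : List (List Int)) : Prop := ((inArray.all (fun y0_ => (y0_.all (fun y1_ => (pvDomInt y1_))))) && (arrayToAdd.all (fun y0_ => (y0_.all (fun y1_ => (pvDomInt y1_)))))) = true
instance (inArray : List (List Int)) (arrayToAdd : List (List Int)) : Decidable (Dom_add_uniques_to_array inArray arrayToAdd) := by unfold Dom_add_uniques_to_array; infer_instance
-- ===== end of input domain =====

-- B sorts the existing keys once and locates each candidate key by a lower-bound binary search
-- instead of A's nested per-item linear scan with a flag. Both A and B mutate inArray in place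
-- (append/extend) and return it; the equivalence proved here is about the return value.

-- ===== PORT A =====
-- pyGetD stands for xs[i] / row[1]; exact under Pre_ (all indices in range there)
def add_uniques_to_array (inArray : List (List Int)) (arrayToAdd : List (List Int)) : List (List Int) :=
  let toAdd : List (List Int) :=
    (PySem.List.pyRange 0 arrayToAdd.length 1).foldl
      (fun (acc : List (List Int)) i =>
        -- inner loop: contain starts False each outer iteration (A resets it at the end)
        let contain : Bool :=
          (PySem.List.pyRange 0 inArray.length 1).foldl
            (fun c j =>
              if PySem.List.pyGetD (PySem.List.pyGetD arrayToAdd i []) 1 0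
                 = PySem.List.pyGetD (PySem.List.pyGetD inArray j []) 1 0 then true else c)
            false
        if contain = false then acc ++ [PySem.List.pyGetD arrayToAdd i []] else acc)
      []
  inArray ++ toAdd

-- ===== PORT B =====
-- B's 'while lo < hi' lower-bound loop; lo/hi stay in 0..keys.length so Nat and getD are exact
def bsearchLB (keys : List Int) (x : Int) (lo hi : Nat) : Nat :=
  if lo < hi then
    let mid := (lo + hi) / 2
    if keys.getD mid 0 < x then bsearchLB keys x (mid + 1) hi else bsearchLB keys x lo mid
  else lo
termination_by hi - lo
decreasing_by all_goals omega

def add_uniques_to_array_alt (inArray : List (List Int)) (arrayToAdd : List (List Int)) : List (List Int) :=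
  let keys : List Int :=
    PySem.List.sorted (inArray.map (fun r => PySem.List.pyGetD r 1 0)) (fun x => x) false
  let n := keys.length
  let out : List (List Int) :=
    arrayToAdd.foldl
      (fun acc row =>
        let x := PySem.List.pyGetD row 1 0
        let lo := bsearchLB keys x 0 n
        if !(decide (lo < n) && decide (keys.getD lo 0 = x)) then acc ++ [row] else acc)
      []
  inArray ++ out

-- ===== PRECONDITION & SPEC =====
-- Pre_ excludes inputs where some row has fewer than 2 elements: A indexes row[1] only when both
-- lists are nonempty (so it still returns when the other list is empty), while B always indexes
-- every row's key and raises IndexError there.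
def Pre_add_uniques_to_array (inArray : List (List Int)) (arrayToAdd : List (List Int)) : Prop :=
  (∀ r ∈ inArray, 2 ≤ r.length) ∧ (∀ r ∈ arrayToAdd, 2 ≤ r.length)
instance (inArray : List (List Int)) (arrayToAdd : List (List Int)) : Decidable (Pre_add_uniques_to_array inArray arrayToAdd) := by unfold Pre_add_uniques_to_array; infer_instance

def pvWitness_add_uniques_to_array : List (List Int) × List (List Int) :=
  ([[1, 2], [3, 4]], [[9, 4], [5, 6]])

def Spec_add_uniques_to_array (inArray : List (List Int)) (arrayToAdd : List (List Int)) (out : List (List Int)) : Prop := out = add_uniques_to_array_alt inArray arrayToAdd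
instance (inArray : List (List Int)) (arrayToAdd : List (List Int)) (out : List (List Int)) : Decidable (Spec_add_uniques_to_array inArray arrayToAdd out) := by unfold Spec_add_uniques_to_array; infer_instance

-- ===== CLAIM (what is proved, stated in full; the proofs are below) =====
def Claim_equal_add_uniques_to_array : Prop := ∀ (inArray : List (List Int)) (arrayToAdd : List (List Int)), Dom_add_uniques_to_array inArray arrayToAdd → Pre_add_uniques_to_array inArray arrayToAdd → Spec_add_uniques_to_array inArray arrayToAdd (add_uniques_to_array inArray arrayToAdd)

-- ===== LEMMAS AND PROOFS =====

-- A's inner loop: the 'contain' fold is a membership test on the keys of inArray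
theorem contain_fold_eq_mem (x : Int) (l : List (List Int)) (c : Bool) :
    l.foldl (fun c r => if x = PySem.List.pyGetD r 1 0 then true else c) c
      = (c || decide (x ∈ l.map (fun r => PySem.List.pyGetD r 1 0))) := by
  induction l generalizing c with
  | nil => simp
  | cons r t ih =>
    simp only [List.foldl_cons, List.map_cons, List.mem_cons, ih]
    by_cases h : x = PySem.List.pyGetD r 1 0 <;> simp [h]

-- appending exactly the rows a predicate rejects is a filter (both A's and B's loop shape)
theorem toAdd_fold_eq_filter (p : List Int → Bool) (l : List (List Int)) :
    l.foldl (fun acc r => if p r = false then acc ++ [r] else acc) [] = l.filter (fun r => !p r) := by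
  have h := PySem.List.foldl_append_if (fun r => !p r) id l []
  simpa [Bool.not_eq_true'] using h

-- bsearchLB invariant on a pairwise-sorted list: it returns the split point of the predicate (· < x)
theorem bsearchLB_split (keys : List Int) (x : Int)
    (hs : keys.Pairwise (· ≤ ·)) :
    ∀ n lo hi, hi - lo = n → lo ≤ hi → hi ≤ keys.length →
      (∀ j, j < lo → keys.getD j 0 < x) →
      (∀ j, hi ≤ j → j < keys.length → ¬ keys.getD j 0 < x) →
      (∀ j, j < bsearchLB keys x lo hi → keys.getD j 0 < x) ∧
      (∀ j, bsearchLB keys x lo hi ≤ j → j < keys.length → ¬ keys.getD j 0 < x) := by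
  have hmono : ∀ i j, i ≤ j → j < keys.length → keys.getD i 0 ≤ keys.getD j 0 := by
    intro i j hij hj
    rcases Nat.eq_or_lt_of_le hij with rfl | hlt
    · exact le_refl _
    · have := (List.pairwise_iff_getElem.mp hs) i j (Nat.lt_trans hlt hj) hj hlt
      simpa [List.getD_eq_getElem?_getD, List.getElem?_eq_getElem, Nat.lt_trans hlt hj, hj] using this
  intro n
  induction n using Nat.strong_induction_on with
  | _ n IH =>
    intro lo hi hn hlohi hhilen hbelow habove
    rw [bsearchLB]
    by_cases hlt : lo < hi
    · simp only [hlt, if_true]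
      set mid := (lo + hi) / 2 with hmid
      have hmlo : lo ≤ mid := by omega
      have hmhi : mid < hi := by omega
      by_cases hk : keys.getD mid 0 < x
      · simp only [hk, if_true]
        exact IH (hi - (mid + 1)) (by omega) (mid + 1) hi rfl (by omega) hhilen
          (fun j hj => by
            by_cases hjm : j ≤ mid
            · exact lt_of_le_of_lt (hmono j mid hjm (by omega)) hk
            · omega)
          habove
      · simp only [hk, if_false]
        exact IH (mid - lo) (by omega) lo mid rfl (by omega) (by omega) hbelow
          (fun j hmj hjlen hjx =>
            hk (lt_of_le_of_lt (hmono mid j hmj hjlen) hjx))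
    · simp only [hlt, if_false]
      exact ⟨fun j hj => hbelow j hj, fun j hj hjl => habove j (by omega) hjl⟩

-- getD is monotone on a pairwise-sorted list (used by both bsearch lemmas)
theorem getD_mono_of_pairwise (keys : List Int) (hs : keys.Pairwise (· ≤ ·)) :
    ∀ i j, i ≤ j → j < keys.length → keys.getD i 0 ≤ keys.getD j 0 := by
  intro i j hij hj
  rcases Nat.eq_or_lt_of_le hij with rfl | hlt
  · exact le_refl _
  · have := (List.pairwise_iff_getElem.mp hs) i j (Nat.lt_trans hlt hj) hj hlt
    simpa [List.getD_eq_getElem?_getD, List.getElem?_eq_getElem, Nat.lt_trans hlt hj, hj] using this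

-- on a pairwise-sorted list, B's test at the split point decides membership
theorem bsearch_present_iff_mem (keys : List Int) (x : Int)
    (hs : keys.Pairwise (· ≤ ·)) :
    (decide (bsearchLB keys x 0 keys.length < keys.length)
      && decide (keys.getD (bsearchLB keys x 0 keys.length) 0 = x)) = decide (x ∈ keys) := by
  obtain ⟨hb, ha⟩ := bsearchLB_split keys x hs keys.length 0 keys.length rfl (Nat.zero_le _)
    (le_refl _) (by omega) (by omega)
  set r := bsearchLB keys x 0 keys.length with hr
  by_cases hmem : x ∈ keys
  · obtain ⟨j, hj, hjx⟩ := List.getElem_of_mem hmem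
    have hgj : keys.getD j 0 = x := by
      simp [List.getD_eq_getElem?_getD, List.getElem?_eq_getElem hj, hjx]
    have hrj : r ≤ j := by
      by_contra hc
      exact absurd hgj (ne_of_lt (hb j (by omega)))
    have hrlen : r < keys.length := by omega
    have h1 : ¬ keys.getD r 0 < x := ha r (le_refl _) hrlen
    have h2 : keys.getD r 0 ≤ x := hgj ▸ getD_mono_of_pairwise keys hs r j hrj hj
    have h3 : keys[r] = x := by
      have := le_antisymm h2 (not_lt.mp h1)
      simpa [List.getD_eq_getElem?_getD, List.getElem?_eq_getElem hrlen] using this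
    simp [hmem, hrlen, h3]
  · simp only [hmem, decide_false]
    by_cases hrlen : r < keys.length
    · have h1 : keys.getD r 0 ≠ x := by
        intro he
        apply hmem
        have hm : keys.getD r 0 ∈ keys := by
          simp [List.getD_eq_getElem?_getD, List.getElem?_eq_getElem hrlen, List.getElem_mem]
        rwa [he] at hm
      have h1' : ¬ keys[r] = x := by
        simpa [List.getD_eq_getElem?_getD, List.getElem?_eq_getElem hrlen] using h1
      simp [List.getElem?_eq_getElem hrlen, h1']
    · simp [hrlen]

-- ===== VERDICT (by name: the statement is the Claim_ definition above) =====
theorem add_uniques_to_array_spec : Claim_equal_add_uniques_to_array := by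
  intro inArray arrayToAdd _ _
  unfold Spec_add_uniques_to_array add_uniques_to_array add_uniques_to_array_alt
  simp only []
  congr 1
  -- A's side: inner flag fold is a membership test, outer fold is a filter
  have hin : ∀ x : Int,
      (PySem.List.pyRange 0 (inArray.length : Int) 1).foldl
        (fun c j => if x = PySem.List.pyGetD (PySem.List.pyGetD inArray j []) 1 0 then true else c) false
      = decide (x ∈ inArray.map (fun r => PySem.List.pyGetD r 1 0)) := by
    intro x
    rw [PySem.List.foldl_pyRange_zero_pyGetD' inArray []
        (fun c r => if x = PySem.List.pyGetD r 1 0 then true else c) false,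
      contain_fold_eq_mem]
    simp
  rw [PySem.List.foldl_pyRange_zero_pyGetD' arrayToAdd []
      (fun acc r =>
        if (PySem.List.pyRange 0 (inArray.length : Int) 1).foldl
            (fun c j => if PySem.List.pyGetD r 1 0
                = PySem.List.pyGetD (PySem.List.pyGetD inArray j []) 1 0 then true else c) false = false
        then acc ++ [r] else acc) []]
  simp only [hin]
  rw [toAdd_fold_eq_filter]
  -- B's side: the append loop is a filter by the binary-search test
  set keys : List Int :=
    PySem.List.sorted (inArray.map (fun r => PySem.List.pyGetD r 1 0)) (fun x => x) false with hkeys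
  have hB := PySem.List.foldl_append_if
    (fun row => !(decide (bsearchLB keys (PySem.List.pyGetD row 1 0) 0 keys.length < keys.length)
        && decide (keys.getD (bsearchLB keys (PySem.List.pyGetD row 1 0) 0 keys.length) 0
            = PySem.List.pyGetD row 1 0)))
    (fun row => row) arrayToAdd []
  simp only [List.nil_append] at hB
  rw [show (fun row => row) = @id (List Int) from rfl, List.map_id] at hB
  rw [hB]
  -- the two filters agree: the split-point test decides membership in the sorted keys
  have hs : keys.Pairwise (· ≤ ·) := by
    simpa using PySem.List.sorted_pairwise (inArray.map (fun r => PySem.List.pyGetD r 1 0)) (fun x => x)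
  apply List.filter_congr
  intro r _
  rw [bsearch_present_iff_mem keys (PySem.List.pyGetD r 1 0) hs]
  congr 1
  simp [hkeys, PySem.List.mem_sorted]
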